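-- pv_equiv track=rewrite | github.com/kayoung-dev/problem-solving | generator/level01/g070.py | solve_internal
-- ===== SOURCE A (Python) =====
-- def solve_internal(n, r, k, stations):
--     from collections import deque
--
--     cp = [0] * n
--     ws = sum(stations[:r+1])
--     for i in range(n):
--         cp[i] = ws
--         if i+r+1 < n: ws += stations[i+r+1]
--         if i-r >= 0: ws -= stations[i-r]
--
--     def check(target):
--         # 여기도 혹시 모르니 deque 사용 확인
--         dq = deque()
--         added, used = 0, 0
--         for i in range(n):
--             while dq and dq[0][1] < i:
--                 added -= dq.popleft()[0]
--             actual = cp[i] + added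
--             if actual < target:
--                 diff = target - actual
--                 used += diff
--                 if used > k: return False
--                 added += diff
--                 dq.append([diff, i + 2*r])
--         return used <= k
--
--     low, high, res = 0, sum(stations) + k, 0
--     while low <= high:
--         mid = (low + high) // 2
--         if check(mid):
--             res = mid
--             low = mid + 1
--         else:
--             high = mid - 1
--     return str(res)
-- ===== SOURCE B (Python) =====
-- def solve_internal(n, r, k, stations):
--     # coverage via prefix sums instead of a sliding-sum loop
--     pre = [0]
--     for x in stations:
--         pre.append(pre[-1] + x)
--     def cov(i):
--         lo = i - r
--         if lo < 0:
--             lo = 0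
--         hi = i + r + 1
--         if hi > n:
--             hi = n
--         return pre[hi] - pre[lo]
--     cp = [cov(i) for i in range(n)]
--
--     def check(target):
--         # difference-style rolling window over a per-house "need" array (no deque)
--         d = []
--         added, used = 0, 0
--         for i in range(n):
--             j = i - 2 * r - 1
--             if j >= 0:
--                 added -= d[j]
--             need = target - cp[i] - added
--             if need <= 0:
--                 need = 0
--             else:
--                 used += need
--                 if used > k:
--                     return False
--                 added += need
--             d.append(need)
--         return used <= k
--
--     def search(low, high, res):
--         if low > high:
--             return res
--         mid = (low + high) // 2
--         if check(mid):
--             return search(mid + 1, high, mid)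
--         return search(low, mid - 1, res)
--
--     return str(search(0, sum(stations) + k, 0))
-- ===== Notes on version B (the rewrite author's own statement) =====
-- stated objective: simpler
-- what changed: coverage precomputation uses prefix sums instead of a sliding-window running sum, and the feasibility check replaces the deque of expiring additions with a rolling per-house need array whose stale entry is subtracted by index (no pop loop); the binary search is recursive. Pre_ excludes negative radii and station lists whose length disagrees with n beyond 0 <= r < n, where A's returned value (when it does not raise) is an accident of Python's negative-index wraparound or of the initial window sum reading past the first n stations; B naturally raises or returns the clamped-window value there.
-- outside the precondition, e.g. on solve_internal(1, -1, 1, [1, 2]): A returns '1', B raises IndexError; on solve_internal(1, 2, 0, [1, 2, 3]): A returns '6', B returns '1'; on solve_internal(3, 5, 0, [1]): A returns '1', B raises IndexError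
import Mathlib
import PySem

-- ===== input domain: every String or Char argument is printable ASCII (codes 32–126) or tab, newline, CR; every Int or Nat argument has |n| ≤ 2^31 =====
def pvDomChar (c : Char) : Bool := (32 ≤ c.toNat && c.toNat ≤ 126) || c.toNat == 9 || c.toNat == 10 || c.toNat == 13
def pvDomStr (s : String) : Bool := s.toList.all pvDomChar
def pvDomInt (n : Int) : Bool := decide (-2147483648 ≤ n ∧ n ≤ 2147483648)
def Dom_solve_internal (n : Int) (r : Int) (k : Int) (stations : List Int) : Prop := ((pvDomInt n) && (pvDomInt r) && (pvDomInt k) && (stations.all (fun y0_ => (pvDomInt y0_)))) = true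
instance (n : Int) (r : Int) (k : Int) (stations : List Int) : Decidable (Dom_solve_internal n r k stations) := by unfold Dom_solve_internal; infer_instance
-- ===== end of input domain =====

-- B replaces A's deque-of-expiring-additions feasibility check by a rolling per-house
-- need array (stale entry subtracted by index) and computes coverage from prefix sums:
-- objective 'simpler' (no pop loop), same asymptotic cost.

-- ===== PORT A =====

-- while dq and dq[0][1] < i: added -= dq.popleft()[0]
def popLoopA : List (Int × Int) → Int → Int → List (Int × Int) × Int
  | [], added, _ => ([], added)
  | (d, e) :: tl, added, i => if e < i then popLoopA tl (added - d) i else ((d, e) :: tl, added)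

-- the body of check(target): for i in range(n) with early return False
def checkGoA (cp : List Int) (r k target : Int) : List Int → List (Int × Int) → Int → Int → Bool
  | [], _, _, used => decide (used ≤ k)
  | i :: rest, dq, added, used =>
    let p := popLoopA dq added i
    let actual := PySem.List.pyGetD cp i 0 + p.2
    if actual < target then
      let diff := target - actual
      let used' := used + diff
      if used' > k then false
      else checkGoA cp r k target rest (p.1 ++ [(diff, i + 2*r)]) (p.2 + diff) used'
    else checkGoA cp r k target rest p.1 p.2 used

-- cp[] sliding-sum precomputation
def cpA (n r : Int) (stations : List Int) : List Int :=
  ((PySem.List.pyRange 0 n 1).foldl (fun (st : List Int × Int) i =>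
      let cps := st.1 ++ [st.2]
      let ws := if i + r + 1 < n then st.2 + PySem.List.pyGetD stations (i + r + 1) 0 else st.2
      let ws := if 0 ≤ i - r then ws - PySem.List.pyGetD stations (i - r) 0 else ws
      (cps, ws))
    ([], (PySem.List.slice stations none (some (r + 1))).sum)).1

-- while low <= high: binary search
def bsearchA (check : Int → Bool) (low high res : Int) : Int :=
  if h : low ≤ high then
    let mid := PySem.Int.floordiv (low + high) 2
    if check mid then bsearchA check (mid + 1) high mid
    else bsearchA check low (mid - 1) res
  else res
termination_by (high + 1 - low).toNat
decreasing_by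
  · have := PySem.Int.floordiv_two_mid_bounds h; omega
  · have := PySem.Int.floordiv_two_mid_bounds h; omega

def solve_internal (n : Int) (r : Int) (k : Int) (stations : List Int) : String :=
  PySem.Int.toStr (bsearchA
    (fun t => checkGoA (cpA n r stations) r k t (PySem.List.pyRange 0 n 1) [] 0 0)
    0 (stations.sum + k) 0)

-- ===== PORT B =====

-- prefix-sum list:  pre = [0]; for x in stations: pre.append(pre[-1] + x)
def preB (stations : List Int) : List Int :=
  stations.foldl (fun pre x => pre ++ [PySem.List.pyGetD pre (-1) 0 + x]) [0]

-- cov(i) = pre[min(i+r+1,n)] - pre[max(i-r,0)]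
def covB (n r : Int) (pre : List Int) (i : Int) : Int :=
  let lo := if i - r < 0 then 0 else i - r
  let hi := if i + r + 1 > n then n else i + r + 1
  PySem.List.pyGetD pre hi 0 - PySem.List.pyGetD pre lo 0

def cpB (n r : Int) (stations : List Int) : List Int :=
  (PySem.List.pyRange 0 n 1).map (covB n r (preB stations))

-- the body of B's check(target): rolling need array d, no pop loop
def checkGoB (cp : List Int) (r k target : Int) : List Int → List Int → Int → Int → Bool
  | [], _, _, used => decide (used ≤ k)
  | i :: rest, d, added, used =>
    let j := i - 2*r - 1
    let added' := if 0 ≤ j then added - PySem.List.pyGetD d j 0 else added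
    let need := target - PySem.List.pyGetD cp i 0 - added'
    if need ≤ 0 then checkGoB cp r k target rest (d ++ [0]) added' used
    else
      let used' := used + need
      if used' > k then false
      else checkGoB cp r k target rest (d ++ [need]) (added' + need) used'

-- recursive binary search
def bsearchB (check : Int → Bool) (low high res : Int) : Int :=
  if h : low ≤ high then
    let mid := PySem.Int.floordiv (low + high) 2
    if check mid then bsearchB check (mid + 1) high mid
    else bsearchB check low (mid - 1) res
  else res
termination_by (high + 1 - low).toNat
decreasing_by
  · have := PySem.Int.floordiv_two_mid_bounds h; omega
  · have := PySem.Int.floordiv_two_mid_bounds h; omega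

def solve_internal_alt (n : Int) (r : Int) (k : Int) (stations : List Int) : String :=
  PySem.Int.toStr (bsearchB
    (fun t => checkGoB (cpB n r stations) r k t (PySem.List.pyRange 0 n 1) [] 0 0)
    0 (stations.sum + k) 0)

-- ===== PRECONDITION & SPEC =====
-- Pre_ excludes negative radii and station lists whose length disagrees with n beyond 0 ≤ r < n:
-- there A raises (IndexError) or its returned value is an accident of Python's negative-index
-- wraparound / of the initial window sum stations[:r+1] reading past the first n stations.
def Pre_solve_internal (n : Int) (r : Int) (k : Int) (stations : List Int) : Prop :=
  n ≤ 0 ∨ (0 ≤ r ∧ (n = (stations.length : Int) ∨ (r < n ∧ n ≤ (stations.length : Int))))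
instance (n : Int) (r : Int) (k : Int) (stations : List Int) : Decidable (Pre_solve_internal n r k stations) := by unfold Pre_solve_internal; infer_instance
def pvWitness_solve_internal : Int × Int × Int × List Int := (2, 1, 3, [1, 2])

def Spec_solve_internal (n : Int) (r : Int) (k : Int) (stations : List Int) (out : String) : Prop := out = solve_internal_alt n r k stations
instance (n : Int) (r : Int) (k : Int) (stations : List Int) (out : String) : Decidable (Spec_solve_internal n r k stations out) := by unfold Spec_solve_internal; infer_instance

-- ===== CLAIM (what is proved, stated in full; the proofs are below) =====
def Claim_equal_solve_internal : Prop := ∀ (n : Int) (r : Int) (k : Int) (stations : List Int), Dom_solve_internal n r k stations → Pre_solve_internal n r k stations → Spec_solve_internal n r k stations (solve_internal n r k stations)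

-- ===== LEMMAS AND PROOFS =====

-- ---- prefix sums ----

def pvPref : List Int → Int → List Int
  | [], c => [c]
  | x :: tl, c => c :: pvPref tl (c + x)

lemma pvPref_fold (L A : List Int) (c : Int) :
    L.foldl (fun pre x => pre ++ [PySem.List.pyGetD pre (-1) 0 + x]) (A ++ [c])
      = A ++ pvPref L c := by
  induction L generalizing A c with
  | nil => simp [pvPref]
  | cons x tl ih =>
    simp only [List.foldl_cons, PySem.List.pyGetD_neg_one_append_singleton]
    have := ih (A ++ [c]) (c + x)
    simpa [pvPref, List.append_assoc] using this

lemma preB_eq (L : List Int) : preB L = pvPref L 0 := by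
  have := pvPref_fold L [] 0
  simpa [preB] using this

lemma pvPref_getD (L : List Int) (c : Int) (j : Nat) (hj : j ≤ L.length) :
    (pvPref L c).getD j 0 = c + (L.take j).sum := by
  induction L generalizing c j with
  | nil =>
    have hj0 : j = 0 := by simpa using hj
    subst hj0; simp [pvPref]
  | cons x tl ih =>
    cases j with
    | zero => simp [pvPref]
    | succ j =>
      simp only [pvPref, List.getD_cons_succ, List.take_succ_cons, List.sum_cons]
      rw [ih (c + x) j (by simpa using hj)]
      ring

def pvS (L : List Int) (j : Nat) : Int := ((L.take j).sum)

lemma pvS_succ (L : List Int) (j : Nat) (hj : j < L.length) :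
    pvS L (j + 1) = pvS L j + L.getD j 0 := by
  simp only [pvS, List.take_succ, List.sum_append, List.getElem?_eq_getElem hj,
    Option.toList_some, List.sum_cons, List.sum_nil, add_zero, List.getD,
    Option.getD_some]

-- ---- cp equality ----

def pvWS (L : List Int) (ν ρ i : Nat) : Int := pvS L (min (i + ρ + 1) ν) - pvS L (i - ρ)

lemma pvWS_zero (L : List Int) (ν ρ : Nat) (hside : ρ < ν ∨ ν = L.length) :
    (PySem.List.slice L none (some ((ρ : Int) + 1))).sum = pvWS L ν ρ 0 := by
  unfold pvWS pvS
  rw [PySem.List.slice_to]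
  · rw [(by omega : ((ρ : Int) + 1).toNat = ρ + 1), (by omega : (0 : Nat) - ρ = 0),
      List.take_zero, List.sum_nil, sub_zero, (by omega : 0 + ρ + 1 = ρ + 1)]
    rcases hside with h | h
    · rw [(by omega : min (ρ + 1) ν = ρ + 1)]
    · subst h
      rw [← List.take_eq_take_min]
  · omega

lemma pvWS_step (L : List Int) (ν ρ i : Nat) (hν : ν ≤ L.length) (hi : i < ν) :
    (if (0:Int) ≤ (i : Int) - (ρ : Int) then
        (if (i : Int) + (ρ : Int) + 1 < (ν : Int) then pvWS L ν ρ i + PySem.List.pyGetD L ((i : Int) + (ρ : Int) + 1) 0 else pvWS L ν ρ i)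
          - PySem.List.pyGetD L ((i : Int) - (ρ : Int)) 0
      else
        (if (i : Int) + (ρ : Int) + 1 < (ν : Int) then pvWS L ν ρ i + PySem.List.pyGetD L ((i : Int) + (ρ : Int) + 1) 0 else pvWS L ν ρ i))
    = pvWS L ν ρ (i + 1) := by
  by_cases hA : (i : Int) + (ρ : Int) + 1 < (ν : Int)
  · rw [if_pos hA]
    have c1 : (i : Int) + (ρ : Int) + 1 = ((i + ρ + 1 : Nat) : Int) := by push_cast; ring
    rw [c1, PySem.List.pyGetD_natCast]
    have m1 : min (i + ρ + 1) ν = i + ρ + 1 := by omega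
    have m2 : min ((i + 1) + ρ + 1) ν = (i + ρ + 1) + 1 := by omega
    by_cases hB : (0:Int) ≤ (i : Int) - (ρ : Int)
    · rw [if_pos hB]
      have c2 : (i : Int) - (ρ : Int) = ((i - ρ : Nat) : Int) := by omega
      rw [c2, PySem.List.pyGetD_natCast]
      have m3 : (i + 1) - ρ = (i - ρ) + 1 := by omega
      unfold pvWS
      rw [m1, m2, m3, pvS_succ L (i + ρ + 1) (by omega), pvS_succ L (i - ρ) (by omega)]
      ring
    · rw [if_neg hB]
      have m3 : (i + 1) - ρ = i - ρ := by omega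
      unfold pvWS
      rw [m1, m2, m3, pvS_succ L (i + ρ + 1) (by omega)]
      ring
  · rw [if_neg hA]
    have m1 : min (i + ρ + 1) ν = ν := by omega
    have m2 : min ((i + 1) + ρ + 1) ν = ν := by omega
    by_cases hB : (0:Int) ≤ (i : Int) - (ρ : Int)
    · rw [if_pos hB]
      have c2 : (i : Int) - (ρ : Int) = ((i - ρ : Nat) : Int) := by omega
      rw [c2, PySem.List.pyGetD_natCast]
      have m3 : (i + 1) - ρ = (i - ρ) + 1 := by omega
      unfold pvWS
      rw [m1, m2, m3, pvS_succ L (i - ρ) (by omega)]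
      ring
    · rw [if_neg hB]
      have m3 : (i + 1) - ρ = i - ρ := by omega
      unfold pvWS
      rw [m1, m2, m3]

lemma cpA_fold (L : List Int) (ν ρ : Nat) (hν : ν ≤ L.length) (hside : ρ < ν ∨ ν = L.length)
    (i : Nat) (hi : i ≤ ν) :
    ((PySem.List.pyRange 0 (i : Int) 1).foldl (fun (st : List Int × Int) j =>
      let cps := st.1 ++ [st.2]
      let ws := if j + (ρ : Int) + 1 < (ν : Int) then st.2 + PySem.List.pyGetD L (j + ρ + 1) 0 else st.2
      let ws := if 0 ≤ j - (ρ : Int) then ws - PySem.List.pyGetD L (j - ρ) 0 else ws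
      (cps, ws))
      ([], (PySem.List.slice L none (some ((ρ : Int) + 1))).sum))
    = ((List.range i).map (pvWS L ν ρ), pvWS L ν ρ i) := by
  induction i with
  | zero =>
    have h0 : PySem.List.pyRange 0 (((0:Nat)) : Int) 1 = [] :=
      PySem.List.pyRange_one_eq_nil (by omega)
    rw [h0, List.foldl_nil, pvWS_zero L ν ρ hside]
    simp
  | succ i ih =>
    have h1 : PySem.List.pyRange 0 (((i + 1 : Nat)) : Int) 1
        = PySem.List.pyRange 0 ((i : Nat) : Int) 1 ++ [((i : Nat) : Int)] := by
      rw [(by push_cast; ring : (((i + 1 : Nat)) : Int) = ((i : Nat) : Int) + 1),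
        PySem.List.pyRange_one_succ_right (by omega)]
    rw [h1, List.foldl_append, ih (by omega), List.foldl_cons, List.foldl_nil]
    simp only []
    rw [List.range_succ, List.map_append, List.map_cons, List.map_nil]
    refine Prod.ext rfl ?_
    show (if 0 ≤ (i : Int) - (ρ : Int) then _ else _) = _
    split <;> rename_i hB
    · rw [← pvWS_step L ν ρ i hν (by omega), if_pos hB]
    · rw [← pvWS_step L ν ρ i hν (by omega), if_neg hB]

lemma cp_eq (L : List Int) (ν ρ : Nat) (hν : ν ≤ L.length) (hside : ρ < ν ∨ ν = L.length) :
    cpA (ν : Int) (ρ : Int) L = cpB (ν : Int) (ρ : Int) L := by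
  unfold cpA cpB
  rw [cpA_fold L ν ρ hν hside ν le_rfl]
  rw [PySem.List.pyRange_one, List.map_map]
  simp only [sub_zero, Int.toNat_natCast]
  apply List.map_congr_left
  intro kk hk
  have hkm : kk < ν := List.mem_range.mp hk
  symm
  show covB (ν : Int) (ρ : Int) (preB L) (0 + (kk : Int)) = pvWS L ν ρ kk
  rw [zero_add]
  unfold covB
  simp only []
  rw [preB_eq]
  have hlo : (if (kk : Int) - (ρ : Int) < 0 then 0 else (kk : Int) - (ρ : Int))
      = ((kk - ρ : Nat) : Int) := by
    split <;> omega
  have hhi : (if (kk : Int) + (ρ : Int) + 1 > (ν : Int) then (ν : Int) else (kk : Int) + (ρ : Int) + 1)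
      = ((min (kk + ρ + 1) ν : Nat) : Int) := by
    split <;> omega
  rw [hlo, hhi, PySem.List.pyGetD_natCast, PySem.List.pyGetD_natCast]
  rw [pvPref_getD L 0 _ (by omega), pvPref_getD L 0 _ (by omega)]
  unfold pvWS pvS
  ring

-- ---- check equality ----

def pvSumW (d : List Int) (a b : Nat) : Int := ((List.range' a (b - a)).map (fun j => d.getD j 0)).sum

def pvDq (r : Int) (d : List Int) (a b : Nat) : List (Int × Int) :=
  (List.range' a (b - a)).filterMap (fun j =>
    let v := d.getD j 0
    if 0 < v then some (v, (j : Int) + 2*r) else none)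

lemma popLoopA_stable (dq : List (Int × Int)) (added i : Int)
    (h : ∀ p ∈ dq, ¬ p.2 < i) : popLoopA dq added i = (dq, added) := by
  cases dq with
  | nil => rfl
  | cons hd tl =>
    obtain ⟨d, e⟩ := hd
    have : ¬ e < i := h (d, e) (by simp)
    simp [popLoopA, this]

lemma pvDq_mem (r : Int) (d : List Int) (a b : Nat) (p : Int × Int) (hp : p ∈ pvDq r d a b) :
    ∃ j : Nat, a ≤ j ∧ p.2 = (j : Int) + 2*r := by
  simp only [pvDq, List.mem_filterMap] at hp
  obtain ⟨j, hj, hv⟩ := hp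
  refine ⟨j, (List.mem_range'_1.mp hj).1, ?_⟩
  obtain ⟨-, rfl⟩ : 0 < d[j]?.getD 0 ∧ (d[j]?.getD 0, (j : Int) + 2*r) = p := by
    simpa using hv
  rfl

lemma pvGetD_nonneg (d : List Int) (hnn : ∀ x ∈ d, 0 ≤ x) (j : Nat) : 0 ≤ d.getD j 0 := by
  rcases Nat.lt_or_ge j d.length with hj | hj
  · rw [List.getD_eq_getElem d 0 hj]
    exact hnn _ (List.getElem_mem hj)
  · rw [List.getD_eq_default d 0 hj]

lemma pvDq_peel (r : Int) (d : List Int) (a b : Nat) (hab : a < b) :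
    pvDq r d a b
      = (if 0 < d.getD a 0 then [(d.getD a 0, (a : Int) + 2*r)] else []) ++ pvDq r d (a+1) b := by
  unfold pvDq
  rw [(by omega : b - a = (b - (a+1)) + 1), List.range'_succ, List.filterMap_cons]
  by_cases h : 0 < d[a]?.getD 0 <;> simp [h, List.getD]

lemma pvSumW_peel (d : List Int) (a b : Nat) (hab : a < b) :
    pvSumW d a b = d.getD a 0 + pvSumW d (a+1) b := by
  unfold pvSumW
  rw [(by omega : b - a = (b - (a+1)) + 1), List.range'_succ]
  simp

lemma pvDq_snoc (r : Int) (d : List Int) (x : Int) (a i : Nat) (hai : a ≤ i) (hd : d.length = i) :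
    pvDq r (d ++ [x]) a (i+1)
      = pvDq r d a i ++ (if 0 < x then [(x, (i : Int) + 2*r)] else []) := by
  unfold pvDq
  rw [(by omega : i + 1 - a = (i - a) + 1), List.range'_1_concat, (by omega : a + (i - a) = i),
    List.filterMap_append]
  congr 1
  · apply List.filterMap_congr
    intro j hj
    have hj' : j < d.length := by
      have := (List.mem_range'_1.mp hj).2; omega
    rw [List.getD_append d [x] 0 j hj']
  · have hx : (d ++ [x]).getD i 0 = x := by
      rw [← hd]; simp [List.getD]
    simp only [List.filterMap_cons, List.filterMap_nil]
    rw [hx]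
    by_cases h : 0 < x <;> simp [h]

lemma pvSumW_snoc (d : List Int) (x : Int) (a i : Nat) (hai : a ≤ i) (hd : d.length = i) :
    pvSumW (d ++ [x]) a (i+1) = pvSumW d a i + x := by
  unfold pvSumW
  rw [(by omega : i + 1 - a = (i - a) + 1), List.range'_1_concat, (by omega : a + (i - a) = i),
    List.map_append, List.sum_append]
  congr 1
  · apply congrArg
    apply List.map_congr_left
    intro j hj
    have hj' : j < d.length := by
      have := (List.mem_range'_1.mp hj).2; omega
    rw [List.getD_append d [x] 0 j hj']
  · have hx : (d ++ [x])[i]?.getD 0 = x := by rw [← hd]; simp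
    simp [List.getD, hx]

lemma pop_step (ρ : Nat) (d : List Int) (i : Nat) (hnn : ∀ x ∈ d, 0 ≤ x) :
    popLoopA (pvDq (ρ : Int) d (i - (2*ρ+1)) i) (pvSumW d (i - (2*ρ+1)) i) (i : Int)
      = (pvDq (ρ : Int) d (i - 2*ρ) i, pvSumW d (i - 2*ρ) i) := by
  by_cases hc : i ≤ 2*ρ
  · rw [(by omega : i - (2*ρ+1) = i - 2*ρ)]
    apply popLoopA_stable
    intro p hp
    obtain ⟨j, hj, he⟩ := pvDq_mem _ _ _ _ _ hp
    rw [he]; omega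
  · push_neg at hc
    have ha : i - (2*ρ+1) < i := by omega
    rw [pvDq_peel _ _ _ _ ha, pvSumW_peel _ _ _ ha, (by omega : i - (2*ρ+1) + 1 = i - 2*ρ)]
    by_cases hv : 0 < d.getD (i - (2*ρ+1)) 0
    · rw [if_pos hv, List.singleton_append]
      have hcond : ((i - (2*ρ+1) : Nat) : Int) + 2*(ρ : Int) < (i : Int) := by omega
      rw [popLoopA, if_pos hcond]
      rw [popLoopA_stable]
      · refine Prod.ext rfl ?_
        show d.getD (i - (2*ρ+1)) 0 + pvSumW d (i - 2*ρ) i - d.getD (i - (2*ρ+1)) 0 = _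
        ring
      · intro p hp
        obtain ⟨j, hj, he⟩ := pvDq_mem _ _ _ _ _ hp
        rw [he]; omega
    · have hv0 : d.getD (i - (2*ρ+1)) 0 = 0 :=
        le_antisymm (not_lt.mp hv) (pvGetD_nonneg d hnn _)
      rw [if_neg hv, hv0, List.nil_append, zero_add]
      apply popLoopA_stable
      intro p hp
      obtain ⟨j, hj, he⟩ := pvDq_mem _ _ _ _ _ hp
      rw [he]; omega

lemma checkGo_eq (cp : List Int) (ρ : Nat) (k t : Int) :
    ∀ (c i : Nat) (d : List Int) (used : Int), d.length = i → (∀ x ∈ d, 0 ≤ x) →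
    checkGoA cp (ρ : Int) k t (PySem.List.pyRange (i : Int) ((i : Int) + (c : Int)) 1)
        (pvDq (ρ : Int) d (i - (2*ρ+1)) i) (pvSumW d (i - (2*ρ+1)) i) used
      = checkGoB cp (ρ : Int) k t (PySem.List.pyRange (i : Int) ((i : Int) + (c : Int)) 1)
        d (pvSumW d (i - (2*ρ+1)) i) used := by
  intro c
  induction c with
  | zero =>
    intro i d used hd hnn
    rw [PySem.List.pyRange_one_eq_nil (by omega)]
    simp only [checkGoA, checkGoB]
  | succ c ih =>
    intro i d used hd hnn
    have hlt : (i : Int) < (i : Int) + ((c + 1 : Nat) : Int) := by omega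
    rw [PySem.List.pyRange_one_cons hlt]
    simp only [checkGoA, checkGoB]
    rw [pop_step ρ d i hnn]
    have hB : (if (0:Int) ≤ (i : Int) - 2*(ρ : Int) - 1
          then pvSumW d (i - (2*ρ+1)) i - PySem.List.pyGetD d ((i : Int) - 2*(ρ : Int) - 1) 0
          else pvSumW d (i - (2*ρ+1)) i)
        = pvSumW d (i - 2*ρ) i := by
      by_cases hcb : (0:Int) ≤ (i : Int) - 2*(ρ : Int) - 1
      · rw [if_pos hcb, (by omega : (i : Int) - 2*(ρ : Int) - 1 = ((i - (2*ρ+1) : Nat) : Int)),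
          PySem.List.pyGetD_natCast, pvSumW_peel d _ _ (by omega),
          (by omega : i - (2*ρ+1) + 1 = i - 2*ρ)]
        ring
      · rw [if_neg hcb, (by omega : i - (2*ρ+1) = i - 2*ρ)]
    rw [hB]
    have hrange : PySem.List.pyRange ((i : Int) + 1) ((i : Int) + ((c + 1 : Nat) : Int)) 1
        = PySem.List.pyRange (((i + 1 : Nat)) : Int) ((((i + 1 : Nat)) : Int) + ((c : Nat) : Int)) 1 := by
      congr 1 <;> omega
    by_cases hneed : t - PySem.List.pyGetD cp (i : Int) 0 - pvSumW d (i - 2*ρ) i ≤ 0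
    · rw [if_neg (by omega : ¬ (PySem.List.pyGetD cp (i : Int) 0 + pvSumW d (i - 2*ρ) i < t)),
        if_pos hneed]
      have e1 : pvDq (ρ : Int) (d ++ [0]) ((i+1) - (2*ρ+1)) (i+1) = pvDq (ρ : Int) d (i - 2*ρ) i := by
        rw [(by omega : (i+1) - (2*ρ+1) = i - 2*ρ), pvDq_snoc _ d 0 _ i (by omega) hd]
        simp
      have e2 : pvSumW (d ++ [0]) ((i+1) - (2*ρ+1)) (i+1) = pvSumW d (i - 2*ρ) i := by
        rw [(by omega : (i+1) - (2*ρ+1) = i - 2*ρ), pvSumW_snoc d 0 _ i (by omega) hd, add_zero]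
      rw [hrange, ← e1, ← e2]
      exact ih (i+1) (d ++ [0]) used (by simp [hd]) (by
        intro x hx
        rcases List.mem_append.mp hx with h | h
        · exact hnn x h
        · rw [List.mem_singleton] at h; omega)
    · rw [if_pos (by omega : PySem.List.pyGetD cp (i : Int) 0 + pvSumW d (i - 2*ρ) i < t),
        if_neg hneed]
      rw [(by ring : t - (PySem.List.pyGetD cp (i : Int) 0 + pvSumW d (i - 2*ρ) i)
            = t - PySem.List.pyGetD cp (i : Int) 0 - pvSumW d (i - 2*ρ) i)]
      by_cases hk : used + (t - PySem.List.pyGetD cp (i : Int) 0 - pvSumW d (i - 2*ρ) i) > k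
      · rw [if_pos hk, if_pos hk]
      · rw [if_neg hk, if_neg hk]
        have e1 : pvDq (ρ : Int) (d ++ [t - PySem.List.pyGetD cp (i : Int) 0 - pvSumW d (i - 2*ρ) i]) ((i+1) - (2*ρ+1)) (i+1)
            = pvDq (ρ : Int) d (i - 2*ρ) i
              ++ [(t - PySem.List.pyGetD cp (i : Int) 0 - pvSumW d (i - 2*ρ) i, (i : Int) + 2*(ρ : Int))] := by
          rw [(by omega : (i+1) - (2*ρ+1) = i - 2*ρ),
            pvDq_snoc _ d _ _ i (by omega) hd, if_pos (by omega)]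
        have e2 : pvSumW (d ++ [t - PySem.List.pyGetD cp (i : Int) 0 - pvSumW d (i - 2*ρ) i]) ((i+1) - (2*ρ+1)) (i+1)
            = pvSumW d (i - 2*ρ) i + (t - PySem.List.pyGetD cp (i : Int) 0 - pvSumW d (i - 2*ρ) i) := by
          rw [(by omega : (i+1) - (2*ρ+1) = i - 2*ρ), pvSumW_snoc d _ _ i (by omega) hd]
        rw [hrange, ← e1, ← e2]
        exact ih (i+1) _ _ (by simp [hd]) (by
          intro x hx
          rcases List.mem_append.mp hx with h | h
          · exact hnn x h
          · rw [List.mem_singleton] at h; omega)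

-- ---- binary search congruence ----

lemma bsearch_congr (f g : Int → Bool) (hfg : ∀ x, f x = g x) :
    ∀ (N : Nat) (low high res : Int), (high + 1 - low).toNat ≤ N →
    bsearchA f low high res = bsearchB g low high res := by
  intro N
  induction N with
  | zero =>
    intro low high res hN
    rw [bsearchA, bsearchB]
    have : ¬ low ≤ high := by omega
    simp [this]
  | succ N ih =>
    intro low high res hN
    rw [bsearchA, bsearchB]
    by_cases h : low ≤ high
    · simp only [h, dif_pos]
      have hb := PySem.Int.floordiv_two_mid_bounds h
      rw [hfg]
      by_cases hc : g (PySem.Int.floordiv (low + high) 2) = true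
      · simp only [hc, if_pos]
        exact ih _ _ _ (by omega)
      · simp only [hc, if_neg, Bool.not_eq_true]
        exact ih _ _ _ (by omega)
    · simp [h]

-- ===== VERDICT (by name: the statement is the Claim_ definition above) =====
theorem solve_internal_spec : Claim_equal_solve_internal := by
  intro n r k L _hdom hpre
  unfold Spec_solve_internal solve_internal solve_internal_alt
  rcases hpre with hn0 | ⟨hr, hcase⟩
  · congr 1
    refine bsearch_congr _ _ ?_ ((L.sum + k) + 1 - 0).toNat 0 (L.sum + k) 0 le_rfl
    intro t
    rw [PySem.List.pyRange_one_eq_nil hn0]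
    simp only [checkGoA, checkGoB]
  · obtain ⟨ν, rfl⟩ : ∃ ν : Nat, n = (ν : Int) :=
      ⟨n.toNat, by rcases hcase with h | h <;> omega⟩
    obtain ⟨ρ, rfl⟩ : ∃ ρ : Nat, r = (ρ : Int) := ⟨r.toNat, by omega⟩
    have hν : ν ≤ L.length := by rcases hcase with h | h <;> omega
    have hside : ρ < ν ∨ ν = L.length := by rcases hcase with h | h <;> [right; left] <;> omega
    congr 1
    refine bsearch_congr _ _ ?_ ((L.sum + k) + 1 - 0).toNat 0 (L.sum + k) 0 le_rfl
    intro t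
    rw [cp_eq L ν ρ hν hside]
    have h := checkGo_eq (cpB (ν : Int) (ρ : Int) L) ρ k t ν 0 [] 0 rfl (by simp)
    simpa [pvDq, pvSumW] using h
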